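-- pv_equiv track=rewrite | github.com/mone847/dobon_01 | cpu.py | has_split_sum_structure
-- ===== SOURCE A (Python) =====
-- def rank_of(card_id: int) -> int:
--     return ((card_id - 1) % 13) + 1  # 1..13
--
-- def has_split_sum_structure(hand: list[int]) -> bool:
--     """
--     例：7 と (4+3) みたいな “分割” を作りやすい構造があるか（教育的な「ドボン体制」）。
--     厳密勝率より「体制を崩さない」方向に効く軽いボーナス。
--     """
--     ranks = [rank_of(c) for c in hand]
--     s = set(ranks)
--     for t in range(2, 14):  # 2..13
--         # t を (a+b) に分解できるカードがあるか
--         for a in range(1, t):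
--             b = t - a
--             if a in s and b in s:
--                 return True
--     return False
-- ===== SOURCE B (Python) =====
-- def rank_of(card_id: int) -> int:
--     return ((card_id - 1) % 13) + 1  # 1..13
--
-- def has_split_sum_structure(hand: list[int]) -> bool:
--     # A split t = a + b with a, b >= 1 and t <= 13 exists iff 2*min(ranks) <= 13.
--     ranks = [rank_of(c) for c in hand]
--     return bool(ranks) and min(ranks) <= 6
-- ===== Notes on version B (the rewrite author's own statement) =====
-- stated objective: simpler
-- what changed: Replaces the nested double loop over all sums t=2..13 and addends a=1..t-1 by a closed-form test: a valid split exists iff the hand is non-empty and its minimum rank is at most 6 (2*min <= 13).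
import Mathlib
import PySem

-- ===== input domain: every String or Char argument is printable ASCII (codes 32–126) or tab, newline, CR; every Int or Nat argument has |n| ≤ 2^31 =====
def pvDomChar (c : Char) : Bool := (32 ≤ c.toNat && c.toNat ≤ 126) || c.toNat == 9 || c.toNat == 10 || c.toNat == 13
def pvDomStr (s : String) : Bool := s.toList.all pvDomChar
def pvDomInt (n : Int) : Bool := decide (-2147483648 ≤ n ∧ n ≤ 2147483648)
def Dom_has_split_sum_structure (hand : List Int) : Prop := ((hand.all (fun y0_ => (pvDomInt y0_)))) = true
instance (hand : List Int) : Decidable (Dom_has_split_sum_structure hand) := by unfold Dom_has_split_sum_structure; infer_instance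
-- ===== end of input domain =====

-- B replaces A's nested loops over all sums by a closed-form minimum-rank test (simpler, same result).
-- ===== PORT A =====
def pvRankOf (card_id : Int) : Int := PySem.Int.mod (card_id - 1) 13 + 1

def has_split_sum_structure (hand : List Int) : Bool :=
  let ranks := hand.map pvRankOf
  let s : PySem.Set Int := PySem.Set.ofList ranks
  (PySem.List.pyRange 2 14 1).any (fun t =>
    (PySem.List.pyRange 1 t 1).any (fun a =>
      let b := t - a
      PySem.Set.contains s a && PySem.Set.contains s b))

-- ===== PORT B =====
def has_split_sum_structure_alt (hand : List Int) : Bool :=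
  match PySem.List.min? (hand.map pvRankOf) (fun x => x) with
  | none => false
  | some m => decide (m ≤ 6)

-- ===== PRECONDITION & SPEC =====
def Spec_has_split_sum_structure (hand : List Int) (out : Bool) : Prop := out = has_split_sum_structure_alt hand
instance (hand : List Int) (out : Bool) : Decidable (Spec_has_split_sum_structure hand out) := by unfold Spec_has_split_sum_structure; infer_instance

-- ===== CLAIM (what is proved, stated in full; the proofs are below) =====
def Claim_equal_has_split_sum_structure : Prop := ∀ (hand : List Int), Dom_has_split_sum_structure hand → Spec_has_split_sum_structure hand (has_split_sum_structure hand)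

-- ===== LEMMAS AND PROOFS =====
theorem pvRankOf_bounds (c : Int) : 1 ≤ pvRankOf c ∧ pvRankOf c ≤ 13 := by
  unfold pvRankOf
  have h1 := PySem.Int.mod_nonneg (c - 1) (b := 13) (by norm_num)
  have h2 := PySem.Int.mod_lt (c - 1) (b := 13) (by norm_num)
  omega

theorem pvA_iff (hand : List Int) :
    has_split_sum_structure hand = true ↔
      ∃ a b, a ∈ hand.map pvRankOf ∧ b ∈ hand.map pvRankOf ∧ a + b ≤ 13 := by
  unfold has_split_sum_structure
  simp only [List.any_eq_true, PySem.List.mem_pyRange_one, Bool.and_eq_true,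
    PySem.Set.contains, List.contains_iff_exists_mem_beq, beq_iff_eq]
  constructor
  · rintro ⟨t, ⟨ht2, ht14⟩, a, ⟨ha1, hat⟩, ⟨x1, hx1s, hx1⟩, ⟨x2, hx2s, hx2⟩⟩
    rw [PySem.Set.mem_ofList] at hx1s hx2s
    exact ⟨x1, x2, hx1s, hx2s, by omega⟩
  · rintro ⟨a, b, ha, hb, hab⟩
    have hba := pvRankOf_bounds
    obtain ⟨ca, hca, rfl⟩ := List.mem_map.mp ha
    obtain ⟨cb, hcb, rfl⟩ := List.mem_map.mp hb
    refine ⟨pvRankOf ca + pvRankOf cb, ⟨?_, ?_⟩, pvRankOf ca, ⟨?_, ?_⟩, ⟨pvRankOf ca, ?_, rfl⟩, ⟨pvRankOf cb, ?_, by ring_nf⟩⟩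
    · have := hba ca; have := hba cb; omega
    · omega
    · exact (hba ca).1
    · have := hba cb; omega
    · rw [PySem.Set.mem_ofList]; exact ha
    · rw [PySem.Set.mem_ofList]; exact hb

-- ===== VERDICT (by name: the statement is the Claim_ definition above) =====
theorem has_split_sum_structure_spec : Claim_equal_has_split_sum_structure := by
  intro hand _
  unfold Spec_has_split_sum_structure has_split_sum_structure_alt
  cases hmin : PySem.List.min? (hand.map pvRankOf) (fun x => x) with
  | none =>
    have hnil := (PySem.List.min?_eq_none_iff (xs := hand.map pvRankOf) (key := fun x => x)).mp hmin
    show has_split_sum_structure hand = false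
    rw [Bool.eq_false_iff]
    intro hA
    obtain ⟨a, b, ha, _, _⟩ := (pvA_iff hand).mp hA
    simp [hnil] at ha
  | some m =>
    show has_split_sum_structure hand = decide (m ≤ 6)
    have hmem := PySem.List.min?_mem hmin
    have hmin' := PySem.List.min?_isMin hmin
    rw [Bool.eq_iff_iff, pvA_iff, decide_eq_true_iff]
    constructor
    · rintro ⟨a, b, ha, hb, hab⟩
      have h1 := hmin' a ha
      have h2 := hmin' b hb
      omega
    · intro hm6
      refine ⟨m, m, hmem, hmem, by omega⟩
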